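-- pv_equiv track=rewrite | github.com/Ashishkumar448/GFG-Problem-of-the-day | 2025-09-September-GFG-POTD/September 19 - Min Add to Make Parentheses Valid/Solution.py | minParentheses
-- ===== SOURCE A (Python) =====
-- def minParentheses(s: str) -> int:
--     balance = 0     # track open '('
--     insertions = 0  # track extra needed
--
--     for c in s:
--         if c == '(':
--             balance += 1
--         else:  # c == ')'
--             if balance > 0:
--                 balance -= 1  # match with '('
--             else:
--                 insertions += 1  # need an extra '('
--
--     # add remaining unmatched '('
--     return insertions + balance
-- ===== SOURCE B (Python) =====
-- def minParentheses(s: str) -> int: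
--     # Two independent directional passes: forward counts missing '(',
--     # backward over reversed(s) counts unmatched '(' needing a ')'.
--     open_ = 0
--     need_open = 0
--     for c in s:
--         if c != '(':
--             if open_:
--                 open_ -= 1
--             else:
--                 need_open += 1
--         else:
--             open_ += 1
--     close = 0
--     need_close = 0
--     for c in reversed(s):
--         if c != '(':
--             close += 1
--         elif close > 0:
--             close -= 1
--         else:
--             need_close += 1
--     return need_open + need_close
-- ===== Notes on version B (the rewrite author's own statement) =====
-- stated objective: alternative
-- what changed: B replaces A's combined pass (insertions + leftover balance) with two independent directional passes: a forward pass counting missing opens and a backward pass over reversed(s) counting unmatched opens needing a close.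
import Mathlib
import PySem

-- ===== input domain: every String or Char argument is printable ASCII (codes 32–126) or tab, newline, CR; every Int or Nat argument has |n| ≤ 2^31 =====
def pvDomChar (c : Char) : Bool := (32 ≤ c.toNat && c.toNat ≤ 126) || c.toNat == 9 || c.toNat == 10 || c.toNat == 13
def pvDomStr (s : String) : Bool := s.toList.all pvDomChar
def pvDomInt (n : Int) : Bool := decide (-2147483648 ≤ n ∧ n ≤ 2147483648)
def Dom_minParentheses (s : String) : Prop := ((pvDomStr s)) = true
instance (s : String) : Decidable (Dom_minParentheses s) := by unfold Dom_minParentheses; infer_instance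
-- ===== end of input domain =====

-- B replaces A's single combined pass (insertions + leftover balance) with two independent
-- directional passes (forward missing-opens, backward-over-reversed missing-closes); same cost.

-- ===== PORT A =====
-- A's loop: balance/insertions, one pass, answer = insertions + balance
def stepA (st : Int × Int) (c : Char) : Int × Int :=
  if c = '(' then (st.1 + 1, st.2)
  else if st.1 > 0 then (st.1 - 1, st.2) else (st.1, st.2 + 1)

def minParentheses (s : String) : Int :=
  let r := s.toList.foldl stepA (0, 0)
  r.2 + r.1

-- ===== PORT B =====
-- B's forward pass: (open_, need_open), branch on c ≠ '(' first, truthiness test on open_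
def stepF (st : Int × Int) (c : Char) : Int × Int :=
  if c ≠ '(' then (if st.1 ≠ 0 then (st.1 - 1, st.2) else (st.1, st.2 + 1))
  else (st.1 + 1, st.2)

-- B's backward pass over reversed(s): (close, need_close)
def stepB (st : Int × Int) (c : Char) : Int × Int :=
  if c ≠ '(' then (st.1 + 1, st.2)
  else if st.1 > 0 then (st.1 - 1, st.2) else (st.1, st.2 + 1)

def minParentheses_alt (s : String) : Int :=
  let f := s.toList.foldl stepF (0, 0)
  let b := s.toList.reverse.foldl stepB (0, 0)
  f.2 + b.2

-- ===== PRECONDITION & SPEC =====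
def Spec_minParentheses (s : String) (out : Int) : Prop := out = minParentheses_alt s
instance (s : String) (out : Int) : Decidable (Spec_minParentheses s out) := by unfold Spec_minParentheses; infer_instance

-- ===== CLAIM (what is proved, stated in full; the proofs are below) =====
def Claim_equal_minParentheses : Prop := ∀ (s : String), Dom_minParentheses s → Spec_minParentheses s (minParentheses s)

-- ===== LEMMAS AND PROOFS =====

-- the backward pass as a foldr on the original list
def bwd (l : List Char) : Int × Int := l.foldr (fun c st => stepB st c) (0, 0)

theorem bwd_eq (l : List Char) : l.reverse.foldl stepB (0, 0) = bwd l := by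
  simp [bwd, List.foldl_reverse]

theorem bwd_nonneg (l : List Char) : 0 ≤ (bwd l).1 ∧ 0 ≤ (bwd l).2 := by
  induction l with
  | nil => simp [bwd]
  | cons c l ih =>
    have hb : bwd (c :: l) = stepB (bwd l) c := rfl
    rw [hb]
    unfold stepB
    split_ifs <;> constructor <;> simp <;> omega

-- forward pass of B coincides with A's fold while the balance stays nonnegative
theorem fwd_eq (l : List Char) : ∀ st : Int × Int, 0 ≤ st.1 →
    l.foldl stepF st = l.foldl stepA st := by
  induction l with
  | nil => intro st _; rfl
  | cons c l ih =>
    intro st h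
    have hstep : stepF st c = stepA st c := by
      unfold stepF stepA; split_ifs <;> simp_all <;> omega
    have hpos : 0 ≤ (stepA st c).1 := by
      unfold stepA; split_ifs <;> simp <;> omega
    simp only [List.foldl_cons, hstep, ih _ hpos]

-- key: A's final balance from an initial balance b equals need_close + max (b - close) 0
theorem balance_bwd (l : List Char) : ∀ (b ins : Int), 0 ≤ b →
    (l.foldl stepA (b, ins)).1 = (bwd l).2 + max (b - (bwd l).1) 0 := by
  induction l with
  | nil => intro b ins h; simp [bwd]; omega
  | cons c l ih =>
    intro b ins h
    obtain ⟨hc, hn⟩ := bwd_nonneg l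
    simp only [List.foldl_cons]
    have hb : bwd (c :: l) = stepB (bwd l) c := rfl
    by_cases hpar : c = '('
    · have hA : stepA (b, ins) c = (b + 1, ins) := by simp [stepA, hpar]
      rw [hA, ih (b + 1) ins (by omega), hb]
      unfold stepB
      simp only [hpar, ne_eq, not_true_eq_false, if_false]
      split_ifs with h1 <;> simp <;> omega
    · have hb0 : bwd (c :: l) = ((bwd l).1 + 1, (bwd l).2) := by
        rw [hb]; unfold stepB; simp [hpar]
      rw [hb0]
      by_cases hpos : b > 0
      · have hA : stepA (b, ins) c = (b - 1, ins) := by simp [stepA, hpar, hpos]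
        rw [hA, ih (b - 1) ins (by omega)]; simp; omega
      · have hA : stepA (b, ins) c = (b, ins + 1) := by simp [stepA, hpar, hpos]
        rw [hA, ih b (ins + 1) h]; simp; omega

-- combine: A = ins + bal, B = ins + need_close, and bal = need_close + max(0 - close) 0 = need_close
theorem main_eq (s : String) : minParentheses s = minParentheses_alt s := by
  unfold minParentheses minParentheses_alt
  rw [bwd_eq, fwd_eq s.toList (0, 0) (by norm_num)]
  obtain ⟨hc, hn⟩ := bwd_nonneg s.toList
  have hbal := balance_bwd s.toList 0 0 (by norm_num)
  simp only at *
  omega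

-- ===== VERDICT (by name: the statement is the Claim_ definition above) =====
theorem minParentheses_spec : Claim_equal_minParentheses := by
  intro s _
  unfold Spec_minParentheses
  exact main_eq s
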